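-- pv_equiv track=rewrite | github.com/deniz-schwenk/independent-wire | src/stages/run_stages.py | select_diverse_hydration_urls
-- ===== SOURCE A (Python) =====
-- HYDRATION_URL_CAP = 40
--
-- MAX_PER_OUTLET = 3
--
-- def select_diverse_hydration_urls(
--     candidates: list[dict],
--     cap: int = HYDRATION_URL_CAP,
--     max_per_outlet: int = MAX_PER_OUTLET,
-- ) -> list[dict]:
--     """Stratified round-robin selection over outlets to cap hydration URLs.
--
--     Picks at most ``cap`` candidates with at most ``max_per_outlet`` from any
--     one outlet, alternating across outlets in alphabetical order. Within an
--     outlet, newer URLs (by ``published_at``) are picked first.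
--
--     Args:
--         candidates: list of dicts, each with at minimum:
--             - ``url`` (str)
--             - ``outlet`` (str, used as the group key)
--             - ``published_at`` (ISO 8601 str or None, used for in-group
--               recency sorting)
--             Other keys pass through unchanged.
--         cap: maximum total URLs to return.
--         max_per_outlet: hard ceiling per outlet, applied regardless of
--           ``cap``. Even with ``cap >= len(candidates)``, no outlet
--           contributes more than this many URLs.
--
--     Returns:
--         List of selected candidates, length ``<= cap``, in pick order
--         (round-robin pass × outlet alphabetic). Deterministic.
--
--     Properties:
--         - ``len(candidates) <= cap`` does NOT short-circuit
--           ``max_per_outlet`` — both constraints always bind.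
--         - If candidates have ``N`` unique outlets >= ``cap``, every
--           selected URL comes from a distinct outlet.
--         - Recency-tiebreak: within an outlet, newer URLs (by
--           ``published_at`` desc) come first.
--         - ``published_at = None`` sorts last within its outlet.
--         - If all candidates within an outlet have ``published_at = None``,
--           sort within that outlet is determined by input order
--           (caller-controlled, stable). This is the current operational
--           state — ``published_at`` is not yet persisted by
--           ``scripts/fetch_feeds.py``. When it is, recency-tiebreak
--           activates automatically with no selector change.
--     """
--     if not candidates:
--         return []
--
--     groups: dict[str, list[dict]] = {}
--     for c in candidates:
--         groups.setdefault(c.get("outlet", "") or "", []).append(c)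
--
--     for outlet, group in groups.items():
--         # Partition: dated entries sorted desc, undated keep input order.
--         # Python's sort is stable, so undated entries' relative order
--         # is the caller's input order.
--         dated = sorted(
--             (c for c in group if c.get("published_at")),
--             key=lambda c: str(c.get("published_at")),
--             reverse=True,
--         )
--         undated = [c for c in group if not c.get("published_at")]
--         groups[outlet] = dated + undated
--
--     selected: list[dict] = []
--     pass_num = 0
--     while (
--         len(selected) < cap
--         and any(groups[o] for o in groups)
--         and pass_num < max_per_outlet
--     ):
--         pass_num += 1
--         for outlet in sorted(groups.keys()):
--             if not groups[outlet]:
--                 continue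
--             selected.append(groups[outlet].pop(0))
--             if len(selected) >= cap:
--                 break
--
--     return selected
-- ===== SOURCE B (Python) =====
-- def select_diverse_hydration_urls(
--     candidates,
--     cap=40,
--     max_per_outlet=3,
-- ):
--     """Priority-number formulation: give each surviving candidate a single
--     integer priority (pass-rank * number-of-outlets + alphabetical outlet
--     index), sort once by that number, slice to cap. No destructive
--     pop/while round-robin loop; inputs are never mutated."""
--     groups = {}
--     for c in candidates:
--         groups.setdefault(c.get("outlet", "") or "", []).append(c)
--     outlets = sorted(groups)
--     n = len(outlets)
--     tagged = []
--     for i, o in enumerate(outlets):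
--         group = groups[o]
--         dated = sorted(
--             (c for c in group if c.get("published_at")),
--             key=lambda c: str(c.get("published_at")),
--             reverse=True,
--         )
--         undated = [c for c in group if not c.get("published_at")]
--         for r, c in enumerate((dated + undated)[:max(0, max_per_outlet)]):
--             tagged.append((r * n + i, c))
--     tagged.sort(key=lambda t: t[0])
--     return [c for _, c in tagged[:max(0, cap)]]
-- ===== Notes on version B (the rewrite author's own statement) =====
-- stated objective: alternative
-- what changed: A selects by a destructive while/pop(0) round-robin over a mutable dict of per-outlet queues with an early cap break; B instead assigns each surviving candidate one integer priority (pass-rank * number-of-outlets + alphabetical outlet index), sorts all tagged candidates once by that number and slices to cap, with no mutation or early exit.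
import Mathlib
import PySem

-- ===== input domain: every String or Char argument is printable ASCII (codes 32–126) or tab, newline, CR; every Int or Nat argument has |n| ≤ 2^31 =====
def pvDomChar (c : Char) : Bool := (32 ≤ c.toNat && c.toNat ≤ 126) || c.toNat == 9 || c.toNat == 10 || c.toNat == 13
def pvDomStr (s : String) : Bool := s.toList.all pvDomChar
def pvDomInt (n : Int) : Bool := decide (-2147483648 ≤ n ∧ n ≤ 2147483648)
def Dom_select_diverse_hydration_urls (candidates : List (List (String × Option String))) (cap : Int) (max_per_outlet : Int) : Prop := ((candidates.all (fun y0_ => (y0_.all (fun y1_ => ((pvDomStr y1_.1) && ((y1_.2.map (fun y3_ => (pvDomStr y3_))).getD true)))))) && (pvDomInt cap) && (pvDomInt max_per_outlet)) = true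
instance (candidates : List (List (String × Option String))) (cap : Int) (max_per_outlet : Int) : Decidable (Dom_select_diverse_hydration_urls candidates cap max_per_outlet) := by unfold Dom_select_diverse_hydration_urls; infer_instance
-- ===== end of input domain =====

-- B replaces A's destructive while/pop round-robin selection by a single global
-- priority number (pass-rank * number-of-outlets + alphabetical outlet index),
-- one sort by that number and a slice to cap (objective: alternative algorithm,
-- same observable result; neither implementation mutates its input here).

-- ===== PORT A =====
abbrev PvItem : Type := List (String × Option String)

-- c.get("outlet", "") or ""
def pvOutlet (c : PvItem) : String :=
  match (PySem.Dict.mk c).get? "outlet" with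
  | some (some s) => if s = "" then "" else s
  | _ => ""

-- bool(c.get("published_at"))  (missing key, None and "" are falsy)
def pvPubTruthy (c : PvItem) : Bool :=
  match (PySem.Dict.mk c).get? "published_at" with
  | some (some s) => s ≠ ""
  | _ => false

-- str(c.get("published_at")); only used on truthy entries, where it is the string itself
def pvPubKey (c : PvItem) : String :=
  match (PySem.Dict.mk c).get? "published_at" with
  | some (some s) => s
  | _ => "None"

-- the grouping loop: groups.setdefault(c.get("outlet","") or "", []).append(c)
-- (setdefault-then-append has the same net effect on the dict as this insert)
def pvGroups (candidates : List PvItem) : PySem.Dict String (List PvItem) :=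
  candidates.foldl (fun d c => d.insert (pvOutlet c) (d.getD (pvOutlet c) [] ++ [c])) PySem.Dict.empty

-- dated entries sorted desc by str(published_at) (stable), then undated in input order
def pvPrep (g : List PvItem) : List PvItem :=
  PySem.List.sorted (g.filter fun c => pvPubTruthy c) (fun c => pvPubKey c) true
    ++ g.filter fun c => !pvPubTruthy c

-- the inner 'for outlet in sorted(groups.keys())' loop of A, with pop(0) and the cap break
def pvInnerPass (cap : Int) : List String → PySem.Dict String (List PvItem) → List PvItem →
    PySem.Dict String (List PvItem) × List PvItem
  | [], d, sel => (d, sel)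
  | o :: rest, d, sel =>
    match d.getD o [] with
    | [] => pvInnerPass cap rest d sel
    | c :: g =>
      let sel' := sel ++ [c]
      let d' := d.insert o g
      if cap ≤ (sel'.length : Int) then (d', sel') else pvInnerPass cap rest d' sel'

-- A's while loop; the fuel is (max_per_outlet - pass_num).toNat, so fuel = 0 ⟺ pass_num ≥ max_per_outlet
def pvALoop (cap : Int) : Nat → PySem.Dict String (List PvItem) → List PvItem → List PvItem
  | 0, _, sel => sel
  | fuel + 1, d, sel =>
    if (sel.length : Int) < cap ∧ d.keys.any (fun o => !(d.getD o []).isEmpty) = true then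
      let r := pvInnerPass cap (PySem.List.sorted d.keys (fun x => x) false) d sel
      pvALoop cap fuel r.1 r.2
    else sel

def select_diverse_hydration_urls (candidates : List (List (String × Option String))) (cap : Int) (max_per_outlet : Int) : List (List (String × Option String)) :=
  if candidates = [] then []
  else
    let groups := pvGroups candidates
    -- for outlet, group in groups.items(): groups[outlet] = dated + undated
    let groups2 := groups.items.foldl (fun d p => d.insert p.1 (pvPrep p.2)) groups
    pvALoop cap max_per_outlet.toNat groups2 []

-- ===== PORT B =====
def select_diverse_hydration_urls_alt (candidates : List (List (String × Option String))) (cap : Int) (max_per_outlet : Int) : List (List (String × Option String)) :=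
  let groups := pvGroups candidates
  let outlets := PySem.List.sorted groups.keys (fun x => x) false
  let n : Int := outlets.length
  -- tagged: one (priority, candidate) pair per surviving candidate
  let tagged := (PySem.List.enumerate outlets).foldl (fun acc io =>
    acc ++ (PySem.List.enumerate
        (PySem.List.slice (pvPrep (groups.getD io.2 [])) none (some (max 0 max_per_outlet)))).map
      (fun rc => (rc.1 * n + io.1, rc.2))) []
  let sortedTagged := PySem.List.sorted tagged (fun t => t.1) false
  (PySem.List.slice sortedTagged none (some (max 0 cap))).map (fun t => t.2)

-- ===== PRECONDITION & SPEC =====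
def Spec_select_diverse_hydration_urls (candidates : List (List (String × Option String))) (cap : Int) (max_per_outlet : Int) (out : List (List (String × Option String))) : Prop := out = select_diverse_hydration_urls_alt candidates cap max_per_outlet
instance (candidates : List (List (String × Option String))) (cap : Int) (max_per_outlet : Int) (out : List (List (String × Option String))) : Decidable (Spec_select_diverse_hydration_urls candidates cap max_per_outlet out) := by unfold Spec_select_diverse_hydration_urls; infer_instance

-- ===== CLAIM (what is proved, stated in full; the proofs are below) =====
def Claim_equal_select_diverse_hydration_urls : Prop := ∀ (candidates : List (List (String × Option String))) (cap : Int) (max_per_outlet : Int), Dom_select_diverse_hydration_urls candidates cap max_per_outlet → Spec_select_diverse_hydration_urls candidates cap max_per_outlet (select_diverse_hydration_urls candidates cap max_per_outlet)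

-- ===== LEMMAS AND PROOFS =====

-- proof-side abbreviations
def pvSK (d : PySem.Dict String (List PvItem)) : List String :=
  PySem.List.sorted d.keys (fun x => x) false

def pvCol (d : PySem.Dict String (List PvItem)) (K : List String) (r : Nat) : List PvItem :=
  K.filterMap (fun o => (d.getD o [])[r]?)

def pvGrid (d : PySem.Dict String (List PvItem)) (K : List String) (M : Nat) : List PvItem :=
  (List.range M).flatMap (fun r => pvCol d K r)

def pvG2 (candidates : List PvItem) : PySem.Dict String (List PvItem) :=
  (pvGroups candidates).items.foldl (fun d p => d.insert p.1 (pvPrep p.2)) (pvGroups candidates)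

def pvTRow (d : PySem.Dict String (List PvItem)) (n : Int) (M : Nat) (io : Int × String) :
    List (Int × PvItem) :=
  (PySem.List.enumerate ((pvPrep (d.getD io.2 [])).take M)).map (fun rc => (rc.1 * n + io.1, rc.2))

def pvCM (d : PySem.Dict String (List PvItem)) (K : List String) (n : Int) (M : Nat) :
    List (Int × PvItem) :=
  (List.range M).flatMap (fun r =>
    (PySem.List.enumerate K).flatMap (fun io => ((pvTRow d n M io)[r]?).toList))

-- ---- generic dict facts ----
lemma pv_get?_eq_none {ν : Type} (d : PySem.Dict String ν) (o : String) (h : o ∉ d.keys) :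
    d.get? o = none := by
  obtain ⟨l⟩ := d
  simp only [PySem.Dict.get?, PySem.Dict.keys] at *
  rw [List.find?_eq_none.mpr, Option.map_none]
  intro p hp
  simp only [beq_iff_eq]
  intro hpe
  exact h (hpe ▸ List.mem_map_of_mem hp)

lemma pv_mem_keys_of_getD_ne (d : PySem.Dict String (List PvItem)) (o : String)
    (h : d.getD o [] ≠ []) : o ∈ d.keys := by
  by_contra hm
  rw [PySem.Dict.getD, pv_get?_eq_none d o hm] at h
  exact h rfl

lemma pv_keys_insert_of_mem {ν : Type} (d : PySem.Dict String ν) (o : String) (v : ν)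
    (h : o ∈ d.keys) : (d.insert o v).keys = d.keys := by
  obtain ⟨l⟩ := d
  simp only [PySem.Dict.keys] at h
  obtain ⟨p, hp, hpe⟩ := List.mem_map.mp h
  have hc : PySem.Dict.contains ⟨l⟩ o = true := by
    simp only [PySem.Dict.contains, List.any_eq_true]
    exact ⟨p, hp, by simp [hpe]⟩
  simp only [PySem.Dict.insert, hc, if_pos, PySem.Dict.keys, List.map_map]
  refine List.map_congr_left ?_
  intro q hq
  by_cases hqo : q.1 = o <;> simp [hqo]

lemma pv_set_update_self (s : List String) (l : List String) (h : ∀ x ∈ l, x ∈ s) :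
    PySem.Set.update s l = s := by
  induction l generalizing s with
  | nil => rfl
  | cons x l ih =>
    have hx : PySem.Set.add s x = s := by
      simp only [PySem.Set.add, PySem.Set.contains]
      rw [if_pos (List.elem_eq_true_of_mem (h x (List.mem_cons_self)))]
    calc PySem.Set.update s (x :: l) = PySem.Set.update (PySem.Set.add s x) l := rfl
      _ = s := by rw [hx]; exact ih s (fun y hy => h y (List.mem_cons_of_mem x hy))

lemma pv_find?_self (K : List String) (o : String) :
    K.find? (fun k => k == o) = if o ∈ K then some o else none := by
  induction K with
  | nil => simp
  | cons k K ih =>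
    by_cases hk : k = o
    · subst hk; simp
    · rw [List.find?_cons_of_neg (by simpa using hk), ih]
      have : ¬ o = k := fun he => hk he.symm
      simp [this]

lemma pv_foldl_update_getD (l : List (String × List PvItem)) :
    ∀ (d : PySem.Dict String (List PvItem)) (o : String), (l.map Prod.fst).Nodup →
    (l.foldl (fun d p => d.insert p.1 (pvPrep p.2)) d).getD o [] =
      (match l.find? (fun p => p.1 == o) with
       | some p => pvPrep p.2
       | none => d.getD o []) := by
  induction l with
  | nil => intro d o _; rfl
  | cons p l ih =>
    intro d o hn
    simp only [List.map_cons, List.nodup_cons] at hn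
    rw [List.foldl_cons, ih _ o hn.2]
    by_cases hpo : p.1 = o
    · rw [List.find?_cons_of_pos (l := l) (by simp [hpo])]
      rw [List.find?_eq_none.mpr, PySem.Dict.getD, hpo, PySem.Dict.get?_insert_self]
      · rfl
      · intro q hq
        simp only [beq_iff_eq]
        intro hqe
        have : q.1 ∈ List.map Prod.fst l := List.mem_map_of_mem hq
        rw [hqe, ← hpo] at this
        exact hn.1 this
    · rw [List.find?_cons_of_neg (l := l) (by simp [hpo])]
      cases hf : List.find? (fun q => q.1 == o) l
      · simp only [PySem.Dict.getD, PySem.Dict.get?_insert_of_ne _ _ (fun h => hpo h.symm)]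
      · rfl

lemma pv_groups_keys_nodup (candidates : List PvItem) : (pvGroups candidates).keys.Nodup := by
  exact PySem.Dict.nodup_keys_foldl_insert_key candidates pvOutlet
    (fun d c => d.getD (pvOutlet c) [] ++ [c]) PySem.Dict.empty List.nodup_nil

lemma pv_G2_keys (candidates : List PvItem) : (pvG2 candidates).keys = (pvGroups candidates).keys := by
  unfold pvG2
  rw [PySem.Dict.keys_foldl_insert_key (pvGroups candidates).items (fun p => p.1)
    (fun _ p => pvPrep p.2) (pvGroups candidates)]
  exact pv_set_update_self _ _ (fun x hx => hx)

lemma pv_G2_getD (candidates : List PvItem) (o : String) :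
    (pvG2 candidates).getD o [] = pvPrep ((pvGroups candidates).getD o []) := by
  have hnd := pv_groups_keys_nodup candidates
  unfold pvG2
  rw [pv_foldl_update_getD _ _ _ hnd]
  rw [PySem.Dict.items_eq_map_keys _ hnd []]
  rw [List.find?_map]
  have : ((fun p : String × List PvItem => p.1 == o) ∘ fun k => (k, (pvGroups candidates).getD k [])) =
      fun k => k == o := rfl
  rw [this, pv_find?_self]
  by_cases hm : o ∈ (pvGroups candidates).keys
  · simp [hm]
  · have h0 : (pvGroups candidates).getD o [] = [] := by
      rw [PySem.Dict.getD, pv_get?_eq_none _ _ hm]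
      rfl
    simp only [hm, if_false, Option.map_none, h0]
    unfold pvPrep
    rw [List.filter_nil, List.filter_nil, (PySem.List.sorted_eq_nil_iff _ _ _).mpr rfl]
    rfl

-- ---- A-side loop characterisation ----
lemma pv_innerPass_cons_nil (cap : Int) (o : String) (rest : List String)
    (d : PySem.Dict String (List PvItem)) (sel : List PvItem) (hg : d.getD o [] = []) :
    pvInnerPass cap (o :: rest) d sel = pvInnerPass cap rest d sel := by
  simp only [pvInnerPass]
  rw [hg]

lemma pv_innerPass_cons_some (cap : Int) (o : String) (rest : List String)
    (d : PySem.Dict String (List PvItem)) (sel : List PvItem) (c : PvItem) (g : List PvItem)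
    (hg : d.getD o [] = c :: g) :
    pvInnerPass cap (o :: rest) d sel =
      (if cap ≤ ((sel ++ [c]).length : Int) then (d.insert o g, sel ++ [c])
       else pvInnerPass cap rest (d.insert o g) (sel ++ [c])) := by
  simp only [pvInnerPass]
  rw [hg]

lemma pv_col_cons_none (d : PySem.Dict String (List PvItem)) (o : String) (rest : List String)
    (hg : d.getD o [] = []) : pvCol d (o :: rest) 0 = pvCol d rest 0 := by
  simp [pvCol, hg]

lemma pv_col_cons_some (d : PySem.Dict String (List PvItem)) (o : String) (rest : List String)
    (c : PvItem) (g : List PvItem) (hg : d.getD o [] = c :: g) :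
    pvCol d (o :: rest) 0 = c :: pvCol d rest 0 := by
  simp [pvCol, hg]

lemma pv_col_insert_ne (d : PySem.Dict String (List PvItem)) (o : String) (g : List PvItem)
    (L : List String) (r : Nat) (ho : o ∉ L) :
    pvCol (d.insert o g) L r = pvCol d L r := by
  unfold pvCol
  refine List.filterMap_congr ?_
  intro o' ho'
  have hne : o' ≠ o := fun he => ho (he ▸ ho')
  rw [PySem.Dict.getD, PySem.Dict.get?_insert_of_ne _ _ hne]
  rfl

lemma pv_col_tail (d d' : PySem.Dict String (List PvItem)) (K : List String)
    (h : ∀ o : String, d'.getD o [] = if o ∈ K then (d.getD o []).tail else d.getD o [])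
    (r : Nat) : pvCol d' K r = pvCol d K (r + 1) := by
  unfold pvCol
  refine List.filterMap_congr ?_
  intro o ho
  rw [h o, if_pos ho, List.getElem?_tail]

lemma pv_grid_succ (d : PySem.Dict String (List PvItem)) (K : List String) (M : Nat) :
    pvGrid d K (M + 1) = pvCol d K 0 ++ (List.range M).flatMap (fun r => pvCol d K (r + 1)) := by
  unfold pvGrid
  rw [List.range_succ_eq_map, List.flatMap_cons, List.flatMap_map]

lemma pv_inner_snd (cap : Int) : ∀ (L : List String) (d : PySem.Dict String (List PvItem))
    (sel : List PvItem), L.Nodup → (sel.length : Int) < cap →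
    (pvInnerPass cap L d sel).2 = sel ++ (pvCol d L 0).take ((cap - sel.length).toNat) := by
  intro L
  induction L with
  | nil =>
    intro d sel _ hlt
    have ht : (cap - (sel.length : Int)).toNat ≠ 0 := by omega
    simp [pvInnerPass, pvCol]
  | cons o rest ih =>
    intro d sel hnod hlt
    rw [List.nodup_cons] at hnod
    cases hg : d.getD o [] with
    | nil =>
      rw [pv_innerPass_cons_nil cap o rest d sel hg, pv_col_cons_none d o rest hg]
      exact ih d sel hnod.2 hlt
    | cons c g =>
      rw [pv_innerPass_cons_some cap o rest d sel c g hg, pv_col_cons_some d o rest c g hg]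
      by_cases hb : cap ≤ (((sel ++ [c]).length : Nat) : Int)
      · rw [if_pos hb]
        have ht : (cap - (sel.length : Int)).toNat = 1 := by
          simp only [List.length_append, List.length_cons, List.length_nil] at hb
          omega
        simp [ht]
      · rw [if_neg hb]
        rw [ih (d.insert o g) (sel ++ [c]) hnod.2 (by simpa using hb)]
        rw [pv_col_insert_ne d o g rest 0 hnod.1]
        have ht : (cap - ((sel ++ [c]).length : Int)).toNat + 1 = (cap - (sel.length : Int)).toNat := by
          simp only [List.length_append, List.length_cons, List.length_nil]
          push_cast
          omega
        rw [← ht, List.take_succ_cons, List.append_assoc]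
        rfl

lemma pv_inner_keys (cap : Int) : ∀ (L : List String) (d : PySem.Dict String (List PvItem))
    (sel : List PvItem), (pvInnerPass cap L d sel).1.keys = d.keys := by
  intro L
  induction L with
  | nil => intro d sel; rfl
  | cons o rest ih =>
    intro d sel
    cases hg : d.getD o [] with
    | nil =>
      rw [pv_innerPass_cons_nil cap o rest d sel hg]
      exact ih d sel
    | cons c g =>
      rw [pv_innerPass_cons_some cap o rest d sel c g hg]
      have hk : (d.insert o g).keys = d.keys :=
        pv_keys_insert_of_mem d o g (pv_mem_keys_of_getD_ne d o (by simp [hg]))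
      by_cases hb : cap ≤ (((sel ++ [c]).length : Nat) : Int)
      · rw [if_pos hb]; exact hk
      · rw [if_neg hb, ih]; exact hk

lemma pv_inner_getD (cap : Int) : ∀ (L : List String) (d : PySem.Dict String (List PvItem))
    (sel : List PvItem), L.Nodup → ((sel.length : Int) + (pvCol d L 0).length < cap) →
    ∀ o : String, (pvInnerPass cap L d sel).1.getD o [] =
      if o ∈ L then (d.getD o []).tail else d.getD o [] := by
  intro L
  induction L with
  | nil =>
    intro d sel _ _ o
    simp [pvInnerPass]
  | cons o rest ih =>
    intro d sel hnod hfull o'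
    rw [List.nodup_cons] at hnod
    cases hg : d.getD o [] with
    | nil =>
      rw [pv_innerPass_cons_nil cap o rest d sel hg,
        ih d sel hnod.2 (by rwa [pv_col_cons_none d o rest hg] at hfull)]
      by_cases ho' : o' = o
      · subst ho'
        simp [hnod.1, hg]
      · simp [List.mem_cons, ho']
    | cons c g =>
      rw [pv_col_cons_some d o rest c g hg] at hfull
      simp only [List.length_cons] at hfull
      rw [pv_innerPass_cons_some cap o rest d sel c g hg]
      rw [if_neg (by simp only [List.length_append, List.length_cons, List.length_nil]; push_cast; omega)]
      have hrec := ih (d.insert o g) (sel ++ [c]) hnod.2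
        (by
          rw [pv_col_insert_ne d o g rest 0 hnod.1]
          simp only [List.length_append, List.length_cons, List.length_nil]
          push_cast
          push_cast at hfull
          omega) o'
      rw [hrec]
      by_cases ho' : o' = o
      · subst ho'
        rw [if_neg hnod.1, if_pos (List.mem_cons_self), hg,
          PySem.Dict.getD, PySem.Dict.get?_insert_self]
        rfl
      · rw [PySem.Dict.getD, PySem.Dict.get?_insert_of_ne _ _ ho']
        simp only [List.mem_cons, ho', false_or]
        rfl

lemma pv_aloop (cap : Int) : ∀ (fuel : Nat) (d : PySem.Dict String (List PvItem))
    (sel : List PvItem), d.keys.Nodup →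
    pvALoop cap fuel d sel = sel ++ (pvGrid d (pvSK d) fuel).take ((cap - sel.length).toNat) := by
  intro fuel
  induction fuel with
  | zero => intro d sel _; simp [pvALoop, pvGrid]
  | succ fuel ih =>
    intro d sel hnd
    by_cases hcond : (sel.length : Int) < cap ∧ d.keys.any (fun o => !(d.getD o []).isEmpty) = true
    · have hlt := hcond.1
      have hnodL : (pvSK d).Nodup := (PySem.List.sorted_perm d.keys (fun x => x) false).nodup_iff.mpr hnd
      have hsnd := pv_inner_snd cap (pvSK d) d sel hnodL hlt
      have hkeys := pv_inner_keys cap (pvSK d) d sel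
      have hsk : pvSK (pvInnerPass cap (pvSK d) d sel).1 = pvSK d :=
        congrArg (fun K => PySem.List.sorted K (fun x => x) false) hkeys
      rw [pvALoop, if_pos hcond]
      show pvALoop cap fuel (pvInnerPass cap (pvSK d) d sel).1 (pvInnerPass cap (pvSK d) d sel).2
        = sel ++ (pvGrid d (pvSK d) (fuel + 1)).take ((cap - (sel.length : Int)).toNat)
      rw [ih (pvInnerPass cap (pvSK d) d sel).1 (pvInnerPass cap (pvSK d) d sel).2
          (hkeys ▸ hnd), hsk, hsnd]
      by_cases hfull : (sel.length : Int) + ((pvCol d (pvSK d) 0).length : Int) < cap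
      · have hgd := pv_inner_getD cap (pvSK d) d sel hnodL (by exact_mod_cast hfull)
        have hgrid : pvGrid (pvInnerPass cap (pvSK d) d sel).1 (pvSK d) fuel
            = (List.range fuel).flatMap (fun r => pvCol d (pvSK d) (r + 1)) := by
          unfold pvGrid
          exact List.flatMap_congr (fun r _ => pv_col_tail d _ (pvSK d) hgd r)
        have htk : (pvCol d (pvSK d) 0).take ((cap - (sel.length : Int)).toNat)
            = pvCol d (pvSK d) 0 := List.take_of_length_le (by omega)
        rw [hgrid, htk, pv_grid_succ, List.take_append, List.append_assoc]
        congr 2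
        · rw [List.take_of_length_le (by omega)]
        · congr 1
          simp only [List.length_append]
          omega
      · have h0 : (cap - (((sel ++ (pvCol d (pvSK d) 0).take ((cap - (sel.length : Int)).toNat)).length : Nat) : Int)).toNat = 0 := by
          simp only [List.length_append, List.length_take]
          omega
        rw [h0, List.take_zero, List.append_nil, pv_grid_succ, List.take_append,
          Nat.sub_eq_zero_of_le (by omega), List.take_zero, List.append_nil]
    · rw [pvALoop, if_neg hcond]
      rcases Decidable.not_and_iff_not_or_not.mp hcond with hlt | hany
      · rw [(by omega : (cap - (sel.length : Int)).toNat = 0), List.take_zero, List.append_nil]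
      · have hempty : ∀ o ∈ d.keys, d.getD o [] = [] := by
          intro o ho
          have := List.any_eq_false.mp (Bool.eq_false_iff.mpr hany) o ho
          simpa using this
        have hcol : ∀ r : Nat, pvCol d (pvSK d) r = [] := by
          intro r
          refine List.filterMap_eq_nil_iff.mpr ?_
          intro o ho
          rw [hempty o ((PySem.List.mem_sorted _ _ _ _).mp ho)]
          rfl
        have hgrid : pvGrid d (pvSK d) (fuel + 1) = [] := by
          unfold pvGrid
          simp [hcol]
        rw [hgrid, List.take_nil, List.append_nil]

-- ---- B-side: the sorted tagged list is the column-major (round-robin) order ----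
lemma pv_flatMap_opt_take {γ : Type} (xs : List γ) (M : Nat) :
    ((List.range M).flatMap fun r => xs[r]?.toList) = xs.take M := by
  induction M with
  | zero => simp
  | succ M ih => rw [List.range_succ, List.flatMap_append, ih, List.flatMap_singleton, List.take_add_one]

lemma pv_perm_append_flatMap {β γ : Type} (l : List β) (f g : β → List γ) :
    (l.flatMap fun x => f x ++ g x).Perm (l.flatMap f ++ l.flatMap g) := by
  induction l with
  | nil => simp
  | cons x l ih =>
    simp only [List.flatMap_cons]
    refine (ih.append_left (f x ++ g x)).trans ?_
    have hsh : ∀ A B C D : List γ, (A ++ B ++ (C ++ D)).Perm (A ++ C ++ (B ++ D)) := by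
      intro A B C D
      simp only [List.append_assoc]
      exact (List.perm_append_comm_assoc B C D).append_left A
    exact hsh (f x) (g x) (l.flatMap f) (l.flatMap g)

lemma pv_transpose_perm {β γ : Type} (l : List β) (g : β → List γ) (M : Nat)
    (h : ∀ b ∈ l, (g b).length ≤ M) :
    ((List.range M).flatMap fun r => l.flatMap fun b => (g b)[r]?.toList).Perm (l.flatMap g) := by
  induction l with
  | nil => simp
  | cons b l ih =>
    simp only [List.flatMap_cons]
    have h1 : ((List.range M).flatMap fun r => (g b)[r]?.toList ++ l.flatMap fun b' => (g b')[r]?.toList).Perm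
        (((List.range M).flatMap fun r => (g b)[r]?.toList) ++
          (List.range M).flatMap fun r => l.flatMap fun b' => (g b')[r]?.toList) :=
      pv_perm_append_flatMap (List.range M) _ _
    refine h1.trans ?_
    rw [pv_flatMap_opt_take, List.take_of_length_le (h b List.mem_cons_self)]
    exact (ih (fun b' hb' => h b' (List.mem_cons_of_mem b hb'))).append_left (g b)

lemma pv_trow_len (d : PySem.Dict String (List PvItem)) (n : Int) (M : Nat) (io : Int × String) :
    (pvTRow d n M io).length ≤ M := by
  simp [pvTRow, PySem.List.length_enumerate]

lemma pv_trow_key (d : PySem.Dict String (List PvItem)) (n : Int) (M : Nat) (io : Int × String)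
    (r : Nat) (x : Int × PvItem) (hx : x ∈ ((pvTRow d n M io)[r]?).toList) :
    x.1 = (r : Int) * n + io.1 := by
  unfold pvTRow at hx
  rw [List.getElem?_map, PySem.List.getElem?_enumerate] at hx
  cases hc : ((pvPrep (d.getD io.2 [])).take M)[r]? with
  | none => rw [hc] at hx; simp at hx
  | some c =>
    rw [hc] at hx
    simp only [Option.map_some, Option.toList_some, List.mem_singleton] at hx
    rw [hx]
    simp

lemma pv_flatMap_toList {β γ : Type} (l : List β) (f : β → Option γ) :
    (l.flatMap fun b => (f b).toList) = l.filterMap f := by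
  induction l with
  | nil => rfl
  | cons b l ih =>
    rw [List.flatMap_cons, ih]
    cases hb : f b with
    | none => rw [List.filterMap_cons_none hb]; simp
    | some c => rw [List.filterMap_cons_some hb]; simp

lemma pv_CM_perm (d : PySem.Dict String (List PvItem)) (K : List String) (n : Int) (M : Nat) :
    (pvCM d K n M).Perm ((PySem.List.enumerate K).flatMap (pvTRow d n M)) := by
  exact pv_transpose_perm (PySem.List.enumerate K) (pvTRow d n M) M
    (fun io _ => pv_trow_len d n M io)

lemma pv_CM_pairwise (d : PySem.Dict String (List PvItem)) (K : List String) (M : Nat) :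
    (pvCM d K (K.length : Int) M).Pairwise (fun a b => a.1 < b.1) := by
  unfold pvCM
  rw [List.pairwise_flatMap]
  constructor
  · intro r _
    rw [List.pairwise_flatMap]
    constructor
    · intro io _
      cases hc : (pvTRow d (K.length : Int) M io)[r]? <;> simp
    · refine (PySem.List.pairwise_lt_enumerate K 0).imp_of_mem ?_
      intro io1 io2 _ _ hlt x hx y hy
      rw [pv_trow_key _ _ _ _ _ _ hx, pv_trow_key _ _ _ _ _ _ hy]
      omega
  · refine (List.pairwise_lt_range).imp_of_mem ?_
    intro r1 r2 hr1 hr2 hlt x hx y hy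
    obtain ⟨io1, hio1, hx⟩ := List.mem_flatMap.mp hx
    obtain ⟨io2, hio2, hy⟩ := List.mem_flatMap.mp hy
    rw [pv_trow_key _ _ _ _ _ _ hx, pv_trow_key _ _ _ _ _ _ hy]
    obtain ⟨k1, hk1, he1⟩ := (PySem.List.mem_enumerate_iff K 0 io1).mp hio1
    obtain ⟨k2, hk2, he2⟩ := (PySem.List.mem_enumerate_iff K 0 io2).mp hio2
    have hb1 : (0 : Int) ≤ io1.1 ∧ io1.1 < (K.length : Int) := by
      rw [he1]; constructor <;> [omega; (simp; omega)]
    have hb2 : (0 : Int) ≤ io2.1 := by rw [he2]; simp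
    have hstep : ((r1 : Int) + 1) * (K.length : Int) ≤ (r2 : Int) * (K.length : Int) := by
      have : ((r1 : Int) + 1) ≤ (r2 : Int) := by exact_mod_cast hlt
      exact mul_le_mul_of_nonneg_right this (by positivity)
    nlinarith [hb1.1, hb1.2, hb2, hstep]

lemma pv_map_snd_CM (d d2 : PySem.Dict String (List PvItem)) (K : List String) (n : Int) (M : Nat)
    (h : ∀ o : String, d2.getD o [] = pvPrep (d.getD o [])) :
    (pvCM d K n M).map (fun t => t.2) = pvGrid d2 K M := by
  unfold pvCM pvGrid
  rw [List.map_flatMap]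
  refine List.flatMap_congr ?_
  intro r hr
  have hrM : r < M := List.mem_range.mp hr
  rw [List.map_flatMap]
  have hpt : ∀ io : Int × String, ((pvTRow d n M io)[r]?.toList).map (fun t => t.2)
      = ((d2.getD io.2 [])[r]?).toList := by
    intro io
    unfold pvTRow
    rw [List.getElem?_map, PySem.List.getElem?_enumerate, h io.2, List.getElem?_take,
      if_pos hrM]
    cases hc : (pvPrep (d.getD io.2 []))[r]? <;> simp
  calc (PySem.List.enumerate K).flatMap (fun io => ((pvTRow d n M io)[r]?.toList).map (fun t => t.2))
      = (PySem.List.enumerate K).flatMap (fun io => ((d2.getD io.2 [])[r]?).toList) :=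
        List.flatMap_congr (fun io _ => hpt io)
    _ = ((PySem.List.enumerate K).map (fun io => io.2)).flatMap (fun o => ((d2.getD o [])[r]?).toList) :=
        by rw [List.flatMap_map]
    _ = K.flatMap (fun o => ((d2.getD o [])[r]?).toList) := by rw [PySem.List.map_snd_enumerate]
    _ = pvCol d2 K r := pv_flatMap_toList K _

-- ===== VERDICT (by name: the statement is the Claim_ definition above) =====
theorem select_diverse_hydration_urls_spec : Claim_equal_select_diverse_hydration_urls := by
  unfold Claim_equal_select_diverse_hydration_urls
  intro candidates cap max_per_outlet _
  unfold Spec_select_diverse_hydration_urls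
  by_cases hc : candidates = []
  · subst hc
    unfold select_diverse_hydration_urls select_diverse_hydration_urls_alt
    rw [if_pos rfl]
    simp only [pvGroups, List.foldl_nil]
    have hk : (PySem.Dict.empty : PySem.Dict String (List PvItem)).keys = [] := rfl
    rw [hk]
    have hs : PySem.List.sorted ([] : List String) (fun x => x) false = [] :=
      (PySem.List.sorted_eq_nil_iff _ _ _).mpr rfl
    rw [hs]
    simp only [PySem.List.enumerate, List.foldl_nil]
    have hs2 : PySem.List.sorted ([] : List (Int × PvItem)) (fun t => t.1) false = [] :=
      (PySem.List.sorted_eq_nil_iff _ _ _).mpr rfl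
    rw [hs2, PySem.List.slice_to _ (le_max_left 0 cap), List.take_nil, List.map_nil]
  · have hG2nd : (pvG2 candidates).keys.Nodup := by
      rw [pv_G2_keys]; exact pv_groups_keys_nodup candidates
    have hsk : pvSK (pvG2 candidates)
        = PySem.List.sorted (pvGroups candidates).keys (fun x => x) false :=
      congrArg (fun K => PySem.List.sorted K (fun x => x) false) (pv_G2_keys candidates)
    have hA : select_diverse_hydration_urls candidates cap max_per_outlet =
        (pvGrid (pvG2 candidates) (PySem.List.sorted (pvGroups candidates).keys (fun x => x) false)
          max_per_outlet.toNat).take cap.toNat := by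
      unfold select_diverse_hydration_urls
      rw [if_neg hc]
      show pvALoop cap max_per_outlet.toNat (pvG2 candidates) [] = _
      rw [pv_aloop cap max_per_outlet.toNat (pvG2 candidates) [] hG2nd, hsk]
      simp only [List.length_nil, Nat.cast_zero, sub_zero, List.nil_append]
    have hB : select_diverse_hydration_urls_alt candidates cap max_per_outlet =
        (pvGrid (pvG2 candidates) (PySem.List.sorted (pvGroups candidates).keys (fun x => x) false)
          max_per_outlet.toNat).take cap.toNat := by
      unfold select_diverse_hydration_urls_alt
      simp only []
      rw [PySem.List.foldl_append_eq_flatMap, List.nil_append]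
      have hsl : ∀ g : List PvItem, PySem.List.slice g none (some (max 0 max_per_outlet))
          = g.take max_per_outlet.toNat := by
        intro g
        rw [PySem.List.slice_to g (le_max_left 0 max_per_outlet)]
        congr 1
        omega
      simp only [hsl]
      have htr : (fun io : Int × String => (PySem.List.enumerate
            ((pvPrep ((pvGroups candidates).getD io.2 [])).take max_per_outlet.toNat)).map
            (fun rc => (rc.1 * ((PySem.List.sorted (pvGroups candidates).keys (fun x => x) false).length : Int) + io.1, rc.2)))
          = pvTRow (pvGroups candidates)
              ((PySem.List.sorted (pvGroups candidates).keys (fun x => x) false).length : Int)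
              max_per_outlet.toNat := rfl
      rw [htr]
      rw [PySem.List.sorted_eq_of_perm_of_pairwise_lt _
        (pvCM (pvGroups candidates)
          (PySem.List.sorted (pvGroups candidates).keys (fun x => x) false)
          ((PySem.List.sorted (pvGroups candidates).keys (fun x => x) false).length : Int)
          max_per_outlet.toNat)
        (fun t => t.1)
        (pv_CM_perm _ _ _ _)
        (pv_CM_pairwise _ _ _)]
      have hsl2 : ∀ g : List (Int × PvItem), PySem.List.slice g none (some (max 0 cap))
          = g.take cap.toNat := by
        intro g
        rw [PySem.List.slice_to g (le_max_left 0 cap)]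
        congr 1
        omega
      rw [hsl2, List.map_take]
      congr 1
      exact pv_map_snd_CM (pvGroups candidates) (pvG2 candidates) _ _ _ (pv_G2_getD candidates)
    rw [hA, hB]
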